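-- pv_equiv track=rewrite | github.com/KrisNguyen135/Project-Euler | p516.py | get_oneplus_hammings
-- ===== SOURCE A (Python) =====
-- from math import sqrt
--
-- def get_oneplus_hammings(oneplus_primes, limit):
--     def recur_get_oneplus_hammings(temp_num, temp_index):
--         sub_limit = sqrt(limit)
--
--         temp_result = [temp_num]
--         for index in range(temp_index + 1, len(oneplus_primes)):
--             if oneplus_primes[index] > sub_limit: break
--             else:
--                 next_num = temp_num * oneplus_primes[index]
--                 if next_num <= limit: temp_result += recur_get_oneplus_hammings(next_num, index)
--                 else: break
--
--         return temp_result
--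
--     oneplus_hammings = recur_get_oneplus_hammings(1, -1)[1:]
--     oneplus_hammings.sort()
--
--     return oneplus_hammings
-- ===== SOURCE B (Python) =====
-- def get_oneplus_hammings(oneplus_primes, limit):
--     # Iterative DFS with an explicit stack of (product, remaining suffix of primes);
--     # integer comparison p*p > limit replaces the float sqrt test (exact for limits in range).
--     results = []
--     stack = [(1, list(oneplus_primes))]
--     while stack:
--         num, rest = stack.pop()
--         for i, p in enumerate(rest):
--             if p > 0 and p * p > limit:
--                 break
--             nxt = num * p
--             if nxt > limit:
--                 break
--             results.append(nxt)
--             stack.append((nxt, rest[i + 1:]))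
--     results.sort()
--     return results
-- ===== Notes on version B (the rewrite author's own statement) =====
-- stated objective: alternative
-- what changed: The nested recursive enumerator is replaced by an iterative depth-first search over an explicit stack of (product, remaining-primes) pairs, and the float sqrt(limit) break test by the exact integer test p*p > limit.
-- crash fix: On limit < 0 A raises ValueError (math domain error from sqrt); B returns []. — e.g. on get_oneplus_hammings([2], -1): A raises ValueError, B returns []
import Mathlib
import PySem

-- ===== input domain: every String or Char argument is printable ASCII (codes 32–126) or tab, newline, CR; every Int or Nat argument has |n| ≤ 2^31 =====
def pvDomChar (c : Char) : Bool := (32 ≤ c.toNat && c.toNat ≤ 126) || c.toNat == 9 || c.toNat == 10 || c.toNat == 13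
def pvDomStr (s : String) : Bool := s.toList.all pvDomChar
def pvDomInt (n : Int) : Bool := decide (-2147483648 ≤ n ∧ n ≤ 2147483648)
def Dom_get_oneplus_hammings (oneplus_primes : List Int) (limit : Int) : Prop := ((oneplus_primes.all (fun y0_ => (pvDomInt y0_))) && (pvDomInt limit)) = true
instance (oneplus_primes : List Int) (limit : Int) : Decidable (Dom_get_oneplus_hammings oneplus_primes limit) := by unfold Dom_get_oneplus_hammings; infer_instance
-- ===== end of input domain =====

-- B replaces the recursive enumeration by an iterative explicit-stack DFS (and the float
-- sqrt(limit) break test by the exact integer test 0 < p ∧ p*p > limit); alternative, not faster.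


-- ===== PORT A =====
-- `oneplus_primes[index] > sqrt(limit)`: for 0 ≤ limit ≤ 2^31 (Pre_/Dom) the IEEE sqrt is
-- correctly rounded and the comparison of the integer p with it is exactly 0 < p ∧ p*p > limit
-- (an integer strictly above √limit exceeds it by ≥ 2^-17, far beyond the ≤ 2^-38 rounding error).
-- The recursion walks suffixes of the list, so `temp_index` is carried as the remaining suffix.
mutual
def pvRecA (limit : Int) (tempNum : Int) (rest : List Int) : List Int :=
  tempNum :: pvGoA limit tempNum rest
termination_by (rest.length, 1)

def pvGoA (limit : Int) (tempNum : Int) : List Int → List Int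
  | [] => []
  | p :: t =>
    if 0 < p ∧ p * p > limit then []
    else
      let nextNum := tempNum * p
      if nextNum ≤ limit then pvRecA limit nextNum t ++ pvGoA limit tempNum t
      else []
termination_by rest => (rest.length, 0)
end

def get_oneplus_hammings (oneplus_primes : List Int) (limit : Int) : List Int :=
  PySem.List.sorted (PySem.List.slice (pvRecA limit 1 oneplus_primes) (some 1) none)
    (fun x => x) false

-- ===== PORT B =====
-- one pass of the inner `for` loop of Source B: returns (results appended, entries pushed, in order)
def pvInnerB (limit num : Int) : List Int → List Int × List (Int × List Int)
  | [] => ([], [])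
  | p :: t =>
    if 0 < p ∧ p * p > limit then ([], [])
    else
      let nxt := num * p
      if nxt > limit then ([], [])
      else
        let pr := pvInnerB limit num t
        (nxt :: pr.1, (nxt, t) :: pr.2)

def pvStackW (e : Int × List Int) : Nat := 2 ^ (e.2.length + 1)

-- termination measure for the stack loop (cited by decreasing_by below)
theorem pvInnerB_weight (limit num : Int) (rest : List Int) :
    (((pvInnerB limit num rest).2).map pvStackW).sum + 1 < 2 ^ (rest.length + 1) := by
  induction rest with
  | nil => simp [pvInnerB]
  | cons p t ih =>
    show (((pvInnerB limit num (p :: t)).2).map pvStackW).sum + 1 < 2 ^ (t.length + 2)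
    simp only [pvInnerB]
    split
    · simp
    · split
      · simp
      · simp only [List.map_cons, List.sum_cons, pvStackW]
        have h2 : (2:Nat) ^ (t.length + 2) = 2 ^ (t.length + 1) + 2 ^ (t.length + 1) := by ring
        omega

-- the `while stack:` loop; stack top at the head, pushes go on reversed (LIFO)
def pvStackB (limit : Int) : List (Int × List Int) → List Int
  | [] => []
  | (num, rest) :: stk =>
    let pr := pvInnerB limit num rest
    pr.1 ++ pvStackB limit (pr.2.reverse ++ stk)
termination_by stk => (stk.map pvStackW).sum
decreasing_by
  simp only [List.map_append, List.sum_append, List.map_reverse, List.sum_reverse,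
    List.map_cons, List.sum_cons, pvStackW]
  have := pvInnerB_weight limit num rest
  omega

def get_oneplus_hammings_alt (oneplus_primes : List Int) (limit : Int) : List Int :=
  PySem.List.sorted (pvStackB limit [(1, oneplus_primes)]) (fun x => x) false

-- ===== PRECONDITION & SPEC =====
-- Pre_ excludes limit < 0, on which A raises ValueError (math domain error in sqrt).
def Pre_get_oneplus_hammings (oneplus_primes : List Int) (limit : Int) : Prop := 0 ≤ limit
instance (oneplus_primes : List Int) (limit : Int) : Decidable (Pre_get_oneplus_hammings oneplus_primes limit) := by unfold Pre_get_oneplus_hammings; infer_instance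
def pvWitness_get_oneplus_hammings : List Int × Int := ([2, 3, 5], 100)

-- On limit < 0 A raises ValueError (math domain error from sqrt); B returns [].
def Raises_get_oneplus_hammings (oneplus_primes : List Int) (limit : Int) : Prop := limit < 0
instance (oneplus_primes : List Int) (limit : Int) : Decidable (Raises_get_oneplus_hammings oneplus_primes limit) := by unfold Raises_get_oneplus_hammings; infer_instance
def pvRaiseWitness_get_oneplus_hammings : List Int × Int := ([2], -1)
def pvRaiseWitnessOut_get_oneplus_hammings : List Int := []

def Spec_get_oneplus_hammings (oneplus_primes : List Int) (limit : Int) (out : List Int) : Prop := out = get_oneplus_hammings_alt oneplus_primes limit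
instance (oneplus_primes : List Int) (limit : Int) (out : List Int) : Decidable (Spec_get_oneplus_hammings oneplus_primes limit out) := by unfold Spec_get_oneplus_hammings; infer_instance

-- ===== CLAIM (what is proved, stated in full; the proofs are below) =====
def Claim_equal_get_oneplus_hammings : Prop := ∀ (oneplus_primes : List Int) (limit : Int), Dom_get_oneplus_hammings oneplus_primes limit → Pre_get_oneplus_hammings oneplus_primes limit → Spec_get_oneplus_hammings oneplus_primes limit (get_oneplus_hammings oneplus_primes limit)
def Claim_raises_get_oneplus_hammings : Prop := (∀ (oneplus_primes : List Int) (limit : Int), Dom_get_oneplus_hammings oneplus_primes limit → Raises_get_oneplus_hammings oneplus_primes limit → ¬ Pre_get_oneplus_hammings oneplus_primes limit) ∧ (Dom_get_oneplus_hammings (pvRaiseWitness_get_oneplus_hammings.1) (pvRaiseWitness_get_oneplus_hammings.2) ∧ Raises_get_oneplus_hammings (pvRaiseWitness_get_oneplus_hammings.1) (pvRaiseWitness_get_oneplus_hammings.2) ∧ get_oneplus_hammings_alt (pvRaiseWitness_get_oneplus_hammings.1) (pvRaiseWitness_get_oneplus_hammings.2) = pvRaiseWitnessOut_get_oneplus_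hammings)

-- ===== LEMMAS AND PROOFS =====

-- one inner pass of B accounts for one node of A's recursion tree, up to permutation
theorem pvInnerB_perm (limit num : Int) (rest : List Int) :
    ((pvInnerB limit num rest).1 ++
      ((pvInnerB limit num rest).2.map (fun e => pvGoA limit e.1 e.2)).flatten).Perm
      (pvGoA limit num rest) := by
  induction rest with
  | nil => simp [pvInnerB, pvGoA]
  | cons p t ih =>
    by_cases hb : 0 < p ∧ p * p > limit
    · simp [pvInnerB, pvGoA, hb]
    · by_cases hl : num * p ≤ limit
      · have hgt : ¬ num * p > limit := by omega
        simp only [pvInnerB, pvGoA, if_neg hb, if_neg hgt, if_pos hl, pvRecA,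
          List.map_cons, List.flatten_cons, List.cons_append]
        refine List.Perm.cons _ ?_
        have h2 := ih.append_left (pvGoA limit (num * p) t)
        refine List.Perm.trans ?_ h2
        rw [← List.append_assoc, ← List.append_assoc]
        exact (List.perm_append_comm).append_right _
      · have hgt : num * p > limit := by omega
        simp [pvInnerB, pvGoA, hb, hl, hgt]

-- the stack loop collects, up to permutation, the A-products of all nodes on the stack
theorem pvStackB_perm (limit : Int) (stk : List (Int × List Int)) :
    (pvStackB limit stk).Perm ((stk.map (fun e => pvGoA limit e.1 e.2)).flatten) := by
  induction stk using pvStackB.induct limit with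
  | case1 => simp [pvStackB]
  | case2 num rest stk pr ih =>
    simp only [pvStackB, List.map_cons, List.flatten_cons]
    refine List.Perm.trans (ih.append_left _) ?_
    simp only [List.map_append, List.flatten_append, List.map_reverse, ← List.append_assoc]
    refine List.Perm.append ?_ (List.Perm.refl _)
    refine List.Perm.trans ?_ (pvInnerB_perm limit num rest)
    exact List.Perm.append_left _ (List.Perm.flatten (List.reverse_perm _))

theorem get_oneplus_hammings_spec : Claim_equal_get_oneplus_hammings := by
  intro primes limit _ _
  unfold Spec_get_oneplus_hammings get_oneplus_hammings get_oneplus_hammings_alt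
  rw [PySem.List.slice_from_one]
  have h1 : (pvRecA limit 1 primes).tail = pvGoA limit 1 primes := by
    simp [pvRecA]
  rw [h1, PySem.List.sorted_id_eq_sorted_id_iff_perm]
  have := pvStackB_perm limit [(1, primes)]
  simpa using this.symm

theorem get_oneplus_hammings_raises : Claim_raises_get_oneplus_hammings := by
  unfold Claim_raises_get_oneplus_hammings
  constructor
  · intro _ limit _ hr hp
    exact absurd hp (by unfold Pre_get_oneplus_hammings Raises_get_oneplus_hammings at *; omega)
  · refine ⟨by decide, by decide, ?_⟩
    simp [get_oneplus_hammings_alt, pvStackB, pvInnerB, pvRaiseWitness_get_oneplus_hammings,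
      pvRaiseWitnessOut_get_oneplus_hammings, PySem.List.sorted]

-- both verdicts in one statement: on Dom, A = B wherever A returns, and where A raises B returns []
theorem get_oneplus_hammings_claims_ok :
    Claim_equal_get_oneplus_hammings ∧ Claim_raises_get_oneplus_hammings :=
  ⟨get_oneplus_hammings_spec, get_oneplus_hammings_raises⟩
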